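-- pv_equiv track=rewrite | github.com/PanzaResce/dataset_refactoring | utils/dataset_utils.py | unfair_document_per_categories
-- ===== SOURCE A (Python) =====
-- aggregation_mapping = {
--     "fair": ["not_clause", "a1", "ch1", "cr1", "j1", "law1", "ltd1", "ter1", "use1", "pinc1"],
--     "a": ["a2", "a3"],
--     "ch": ["ch2", "ch3"],
--     "cr": ["cr2", "cr3"],
--     "j": ["j2", "j3"],
--     "law": ["law2", "law3"],
--     "ltd": ["ltd2", "ltd3"],
--     "ter": ["ter2", "ter3"],
--     "use": ["use2", "use3"],
--     "pinc": ["pinc2", "pinc3"]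
-- }
--
-- def unfair_document_per_categories(labels_per_doc, id_to_tags):
--     unfair_doc_freqs = {k:0 for k in aggregation_mapping.keys()}
--
--     def find_aggregated_tag(tag):
--         for k,v in aggregation_mapping.items():
--             if tag in v:
--                 return k
--
--     for doc in labels_per_doc.keys():
--         already_counted = {k:False for k in aggregation_mapping.keys()}
--         labels_in_doc = labels_per_doc[doc]
--         for lbs in labels_in_doc:
--             for l in lbs:
--                 tag = id_to_tags[l]
--                 aggregated_tag = find_aggregated_tag(tag)
--                 if not already_counted[aggregated_tag]:
--                     unfair_doc_freqs[aggregated_tag] += 1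
--                     already_counted[aggregated_tag] = True
--     return unfair_doc_freqs
-- ===== SOURCE B (Python) =====
-- aggregation_mapping = {
--     "fair": ["not_clause", "a1", "ch1", "cr1", "j1", "law1", "ltd1", "ter1", "use1", "pinc1"],
--     "a": ["a2", "a3"],
--     "ch": ["ch2", "ch3"],
--     "cr": ["cr2", "cr3"],
--     "j": ["j2", "j3"],
--     "law": ["law2", "law3"],
--     "ltd": ["ltd2", "ltd3"],
--     "ter": ["ter2", "ter3"],
--     "use": ["use2", "use3"],
--     "pinc": ["pinc2", "pinc3"]
-- }
--
-- def unfair_document_per_categories(labels_per_doc, id_to_tags):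
--     rev = {tag: cat for cat, tags in aggregation_mapping.items() for tag in tags}
--     return {
--         cat: sum(
--             1
--             for doc in labels_per_doc
--             if any(rev[id_to_tags[l]] == cat
--                    for lbs in labels_per_doc[doc] for l in lbs)
--         )
--         for cat in aggregation_mapping
--     }
-- ===== Notes on version B (the rewrite author's own statement) =====
-- stated objective: simpler
-- what changed: Replaced the mutable counter dict with per-doc boolean dedup flags and inline increments by a precomputed reverse tag-to-category map and a side-effect-free per-category count of the documents containing a label of that category.
import Mathlib
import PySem

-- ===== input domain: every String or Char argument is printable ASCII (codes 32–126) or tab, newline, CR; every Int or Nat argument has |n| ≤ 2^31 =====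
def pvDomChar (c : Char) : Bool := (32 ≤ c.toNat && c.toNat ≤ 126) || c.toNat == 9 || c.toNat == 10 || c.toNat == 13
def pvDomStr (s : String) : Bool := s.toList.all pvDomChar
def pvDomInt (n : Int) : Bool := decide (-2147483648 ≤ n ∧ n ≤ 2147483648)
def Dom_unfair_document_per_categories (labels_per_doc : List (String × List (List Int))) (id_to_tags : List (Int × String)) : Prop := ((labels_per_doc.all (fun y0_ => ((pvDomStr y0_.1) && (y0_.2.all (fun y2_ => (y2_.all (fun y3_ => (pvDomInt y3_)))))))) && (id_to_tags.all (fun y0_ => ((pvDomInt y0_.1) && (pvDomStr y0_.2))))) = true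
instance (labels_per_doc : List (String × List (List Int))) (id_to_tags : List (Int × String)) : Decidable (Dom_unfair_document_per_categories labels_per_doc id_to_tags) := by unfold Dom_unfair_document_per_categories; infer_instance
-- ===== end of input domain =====

-- B replaces A's mutable counter dict + per-doc dedup flags by a reverse tag→category map and a
-- per-category count of documents containing a matching label (return-value equivalence; no speed claim).

def aggregation_mapping : List (String × List String) :=
  [("fair", ["not_clause", "a1", "ch1", "cr1", "j1", "law1", "ltd1", "ter1", "use1", "pinc1"]),
   ("a", ["a2", "a3"]), ("ch", ["ch2", "ch3"]), ("cr", ["cr2", "cr3"]), ("j", ["j2", "j3"]),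
   ("law", ["law2", "law3"]), ("ltd", ["ltd2", "ltd3"]), ("ter", ["ter2", "ter3"]),
   ("use", ["use2", "use3"]), ("pinc", ["pinc2", "pinc3"])]

-- ===== PORT A =====
def findAggregatedTag (tag : String) : List (String × List String) → Option String
  | [] => none
  | (k, v) :: rest => if tag ∈ v then some k else findAggregatedTag tag rest

def unfair_document_per_categories (labels_per_doc : List (String × List (List Int))) (id_to_tags : List (Int × String)) : List (String × Int) :=
  let init : PySem.Dict String Int :=
    aggregation_mapping.foldl (fun d p => d.insert p.1 0) PySem.Dict.empty
  let final := labels_per_doc.foldl (fun (freqs : PySem.Dict String Int) doc =>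
    let ac0 : PySem.Dict String Bool :=
      aggregation_mapping.foldl (fun d p => d.insert p.1 false) PySem.Dict.empty
    let st := doc.2.foldl (fun st lbs =>
      lbs.foldl (fun (st : PySem.Dict String Int × PySem.Dict String Bool) l =>
        let tag := (PySem.Dict.mk id_to_tags).getD l ""
        let agg := (findAggregatedTag tag aggregation_mapping).getD ""
        if st.2.getD agg false then st
        else (st.1.insert agg (st.1.getD agg 0 + 1), st.2.insert agg true)) st) (freqs, ac0)
    st.1) init
  final.items

-- ===== PORT B =====
def revMap : PySem.Dict String String :=
  aggregation_mapping.foldl (fun d p => p.2.foldl (fun d t => d.insert t p.1) d) PySem.Dict.empty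

def unfair_document_per_categories_alt (labels_per_doc : List (String × List (List Int))) (id_to_tags : List (Int × String)) : List (String × Int) :=
  aggregation_mapping.map (fun p =>
    (p.1, (labels_per_doc.countP (fun doc =>
        doc.2.any (fun lbs => lbs.any (fun l =>
          revMap.getD ((PySem.Dict.mk id_to_tags).getD l "") "" == p.1))) : Int)))

-- ===== PRECONDITION & SPEC =====
def allAggTags : List String := aggregation_mapping.flatMap Prod.snd

-- Pre_ excludes exactly the inputs on which the Python A raises a KeyError: a label id that is not a
-- key of id_to_tags, or one whose tag belongs to no aggregation category.
def Pre_unfair_document_per_categories (labels_per_doc : List (String × List (List Int))) (id_to_tags : List (Int × String)) : Prop :=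
  ∀ p ∈ labels_per_doc, ∀ lbs ∈ p.2, ∀ l ∈ lbs,
    ∃ t, (PySem.Dict.mk id_to_tags).get? l = some t ∧ t ∈ allAggTags

instance (labels_per_doc : List (String × List (List Int))) (id_to_tags : List (Int × String)) : Decidable (Pre_unfair_document_per_categories labels_per_doc id_to_tags) := by unfold Pre_unfair_document_per_categories; infer_instance

def pvWitness_unfair_document_per_categories : (List (String × List (List Int))) × (List (Int × String)) :=
  ([("d1", [[0, 1], [1]]), ("d2", [[0]])], [(0, "a2"), (1, "ltd3")])

def Spec_unfair_document_per_categories (labels_per_doc : List (String × List (List Int))) (id_to_tags : List (Int × String)) (out : List (String × Int)) : Prop := out = unfair_document_per_categories_alt labels_per_doc id_to_tags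
instance (labels_per_doc : List (String × List (List Int))) (id_to_tags : List (Int × String)) (out : List (String × Int)) : Decidable (Spec_unfair_document_per_categories labels_per_doc id_to_tags out) := by unfold Spec_unfair_document_per_categories; infer_instance

-- ===== CLAIM (what is proved, stated in full; the proofs are below) =====
def Claim_equal_unfair_document_per_categories : Prop := ∀ (labels_per_doc : List (String × List (List Int))) (id_to_tags : List (Int × String)), Dom_unfair_document_per_categories labels_per_doc id_to_tags → Pre_unfair_document_per_categories labels_per_doc id_to_tags → Spec_unfair_document_per_categories labels_per_doc id_to_tags (unfair_document_per_categories labels_per_doc id_to_tags)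

-- ===== LEMMAS AND PROOFS =====

def cats : List String := aggregation_mapping.map Prod.fst

def catA (id_to_tags : List (Int × String)) (l : Int) : String :=
  (findAggregatedTag ((PySem.Dict.mk id_to_tags).getD l "") aggregation_mapping).getD ""

def freqD (f : String → Int) : PySem.Dict String Int := PySem.Dict.mk (cats.map (fun c => (c, f c)))

def flagD (g : String → Bool) : PySem.Dict String Bool := PySem.Dict.mk (cats.map (fun c => (c, g c)))

set_option maxHeartbeats 1000000 in
lemma revMap_lit : revMap = PySem.Dict.mk [("not_clause","fair"),("a1","fair"),("ch1","fair"),("cr1","fair"),("j1","fair"),("law1","fair"),("ltd1","fair"),("ter1","fair"),("use1","fair"),("pinc1","fair"),("a2","a"),("a3","a"),("ch2","ch"),("ch3","ch"),("cr2","cr"),("cr3","cr"),("j2","j"),("j3","j"),("law2","law"),("law3","law"),("ltd2","ltd"),("ltd3","ltd"),("ter2","ter"),("ter3","ter"),("use2","use"),("use3","use"),("pinc2","pinc"),("pinc3","pinc")] := by decide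

set_option maxHeartbeats 4000000 in
lemma revMap_eq_find (tag : String) :
    revMap.getD tag "" = (findAggregatedTag tag aggregation_mapping).getD "" := by
  by_cases h : tag ∈ (["not_clause","a1","ch1","cr1","j1","law1","ltd1","ter1","use1","pinc1","a2","a3","ch2","ch3","cr2","cr3","j2","j3","law2","law3","ltd2","ltd3","ter2","ter3","use2","use3","pinc2","pinc3"] : List String)
  · rw [revMap_lit]
    simp only [List.mem_cons, List.not_mem_nil, or_false] at h
    rcases h with rfl|rfl|rfl|rfl|rfl|rfl|rfl|rfl|rfl|rfl|rfl|rfl|rfl|rfl|rfl|rfl|rfl|rfl|rfl|rfl|rfl|rfl|rfl|rfl|rfl|rfl|rfl|rfl <;> decide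
  · simp only [List.mem_cons, List.not_mem_nil, or_false, not_or] at h
    obtain ⟨h1,h2,h3,h4,h5,h6,h7,h8,h9,h10,h11,h12,h13,h14,h15,h16,h17,h18,h19,h20,h21,h22,h23,h24,h25,h26,h27,h28⟩ := h
    rw [revMap_lit]
    simp [PySem.Dict.getD_eq_get?_getD, PySem.Dict.get?_mk_cons, findAggregatedTag, aggregation_mapping,
      Ne.symm h1, Ne.symm h2, Ne.symm h3, Ne.symm h4, Ne.symm h5, Ne.symm h6, Ne.symm h7, Ne.symm h8, Ne.symm h9, Ne.symm h10,
      h1,h2,h3,h4,h5,h6,h7,h8,h9,h10,h11,h12,h13,h14,h15,h16,h17,h18,h19,h20,h21,h22,h23,h24,h25,h26,h27,h28,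
      Ne.symm h11, Ne.symm h12, Ne.symm h13, Ne.symm h14, Ne.symm h15, Ne.symm h16, Ne.symm h17, Ne.symm h18, Ne.symm h19, Ne.symm h20,
      Ne.symm h21, Ne.symm h22, Ne.symm h23, Ne.symm h24, Ne.symm h25, Ne.symm h26, Ne.symm h27, Ne.symm h28]
    rfl

set_option maxHeartbeats 1000000 in
lemma find_mem_cats (tag : String) (h : tag ∈ allAggTags) :
    (findAggregatedTag tag aggregation_mapping).getD "" ∈ cats := by
  simp only [allAggTags, aggregation_mapping, List.flatMap_cons, List.flatMap_nil, List.append_nil,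
    List.mem_append, List.mem_cons, List.not_mem_nil, or_false] at h
  rcases h with ⟨rfl|rfl|rfl|rfl|rfl|rfl|rfl|rfl|rfl|rfl⟩|⟨rfl|rfl⟩|⟨rfl|rfl⟩|⟨rfl|rfl⟩|⟨rfl|rfl⟩|⟨rfl|rfl⟩|⟨rfl|rfl⟩|⟨rfl|rfl⟩|⟨rfl|rfl⟩|⟨rfl|rfl⟩ <;> decide

set_option maxHeartbeats 1000000 in
lemma getD_freqD (f : String → Int) (c : String) (d : Int) :
    (freqD f).getD c d = if c ∈ cats then f c else d := by
  by_cases h : c ∈ cats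
  · simp only [cats, aggregation_mapping, List.map_cons, List.map_nil, List.mem_cons, List.not_mem_nil, or_false] at h
    rcases h with rfl|rfl|rfl|rfl|rfl|rfl|rfl|rfl|rfl|rfl <;>
      simp [freqD, cats, aggregation_mapping, PySem.Dict.getD_eq_get?_getD, PySem.Dict.get?_mk_cons]
  · rw [if_neg h]
    simp only [cats, aggregation_mapping, List.map_cons, List.map_nil, List.mem_cons, List.not_mem_nil, or_false, not_or] at h
    obtain ⟨h1,h2,h3,h4,h5,h6,h7,h8,h9,h10⟩ := h
    simp [freqD, cats, aggregation_mapping, PySem.Dict.getD_eq_get?_getD, PySem.Dict.get?_mk_cons,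
      Ne.symm h1, Ne.symm h2, Ne.symm h3, Ne.symm h4, Ne.symm h5, Ne.symm h6, Ne.symm h7, Ne.symm h8, Ne.symm h9, Ne.symm h10]
    rfl

set_option maxHeartbeats 1000000 in
lemma insert_freqD (f : String → Int) (c : String) (v : Int) (hc : c ∈ cats) :
    (freqD f).insert c v = freqD (fun x => if x = c then v else f x) := by
  simp only [cats, aggregation_mapping, List.map_cons, List.map_nil, List.mem_cons, List.not_mem_nil, or_false] at hc
  rcases hc with rfl|rfl|rfl|rfl|rfl|rfl|rfl|rfl|rfl|rfl <;>
    simp [freqD, cats, aggregation_mapping, PySem.Dict.insert]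

set_option maxHeartbeats 1000000 in
lemma getD_flagD (g : String → Bool) (c : String) (d : Bool) :
    (flagD g).getD c d = if c ∈ cats then g c else d := by
  by_cases h : c ∈ cats
  · simp only [cats, aggregation_mapping, List.map_cons, List.map_nil, List.mem_cons, List.not_mem_nil, or_false] at h
    rcases h with rfl|rfl|rfl|rfl|rfl|rfl|rfl|rfl|rfl|rfl <;>
      simp [flagD, cats, aggregation_mapping, PySem.Dict.getD_eq_get?_getD, PySem.Dict.get?_mk_cons]
  · rw [if_neg h]
    simp only [cats, aggregation_mapping, List.map_cons, List.map_nil, List.mem_cons, List.not_mem_nil, or_false, not_or] at h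
    obtain ⟨h1,h2,h3,h4,h5,h6,h7,h8,h9,h10⟩ := h
    simp [flagD, cats, aggregation_mapping, PySem.Dict.getD_eq_get?_getD, PySem.Dict.get?_mk_cons,
      Ne.symm h1, Ne.symm h2, Ne.symm h3, Ne.symm h4, Ne.symm h5, Ne.symm h6, Ne.symm h7, Ne.symm h8, Ne.symm h9, Ne.symm h10]
    rfl

set_option maxHeartbeats 1000000 in
lemma insert_flagD (g : String → Bool) (c : String) (v : Bool) (hc : c ∈ cats) :
    (flagD g).insert c v = flagD (fun x => if x = c then v else g x) := by
  simp only [cats, aggregation_mapping, List.map_cons, List.map_nil, List.mem_cons, List.not_mem_nil, or_false] at hc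
  rcases hc with rfl|rfl|rfl|rfl|rfl|rfl|rfl|rfl|rfl|rfl <;>
    simp [flagD, cats, aggregation_mapping, PySem.Dict.insert]

lemma inner_loop (itt : List (Int × String)) (ls : List Int) (f : String → Int) (g : String → Bool)
    (h : ∀ l ∈ ls, catA itt l ∈ cats) :
    ls.foldl (fun (st : PySem.Dict String Int × PySem.Dict String Bool) l =>
        let tag := (PySem.Dict.mk itt).getD l ""
        let agg := (findAggregatedTag tag aggregation_mapping).getD ""
        if st.2.getD agg false then st
        else (st.1.insert agg (st.1.getD agg 0 + 1), st.2.insert agg true)) (freqD f, flagD g)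
    = (freqD (fun c => if g c then f c else if ls.any (fun l => catA itt l == c) then f c + 1 else f c),
       flagD (fun c => g c || ls.any (fun l => catA itt l == c))) := by
  induction ls generalizing f g with
  | nil =>
    simp only [List.foldl_nil, List.any_nil, Bool.or_false]
    refine Prod.ext ?_ ?_ <;> simp only
    congr 1; funext c; by_cases hgc : g c <;> simp [hgc]
  | cons l ls ih =>
    have ha : catA itt l ∈ cats := h l (List.mem_cons_self ..)
    have htail : ∀ x ∈ ls, catA itt x ∈ cats := fun x hx => h x (List.mem_cons_of_mem _ hx)
    rw [List.foldl_cons]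
    show ls.foldl _ (if (flagD g).getD (catA itt l) false then (freqD f, flagD g)
      else ((freqD f).insert (catA itt l) ((freqD f).getD (catA itt l) 0 + 1), (flagD g).insert (catA itt l) true)) = _
    rw [getD_flagD, if_pos ha, getD_freqD, if_pos ha, insert_freqD _ _ _ ha, insert_flagD _ _ _ ha]
    by_cases hga : g (catA itt l)
    · rw [if_pos hga]
      rw [ih f g htail]
      refine Prod.ext ?_ ?_ <;> simp only
      · congr 1; funext c
        by_cases hc : catA itt l = c
        · subst hc; simp [hga]
        · have hb : (catA itt l == c) = false := beq_eq_false_iff_ne.mpr hc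
          simp [List.any_cons, hb]
      · congr 1; funext c
        by_cases hc : catA itt l = c
        · subst hc; simp [hga]
        · have hb : (catA itt l == c) = false := beq_eq_false_iff_ne.mpr hc
          simp [List.any_cons, hb]
    · rw [if_neg hga]
      rw [ih _ _ htail]
      refine Prod.ext ?_ ?_ <;> simp only
      · congr 1; funext c
        by_cases hc : catA itt l = c
        · subst hc; simp [hga]
        · have hb : (catA itt l == c) = false := beq_eq_false_iff_ne.mpr hc
          simp [List.any_cons, hb, Ne.symm hc]
      · congr 1; funext c
        by_cases hc : catA itt l = c
        · subst hc; simp [hga]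
        · have hb : (catA itt l == c) = false := beq_eq_false_iff_ne.mpr hc
          simp [List.any_cons, hb, Ne.symm hc]

lemma outer_loop (itt : List (Int × String)) (docs : List (String × List (List Int))) (f : String → Int)
    (h : ∀ p ∈ docs, ∀ lbs ∈ p.2, ∀ l ∈ lbs, catA itt l ∈ cats) :
    docs.foldl (fun (freqs : PySem.Dict String Int) doc =>
      let ac0 : PySem.Dict String Bool :=
        aggregation_mapping.foldl (fun d p => d.insert p.1 false) PySem.Dict.empty
      let st := doc.2.foldl (fun st lbs =>
        lbs.foldl (fun (st : PySem.Dict String Int × PySem.Dict String Bool) l =>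
          let tag := (PySem.Dict.mk itt).getD l ""
          let agg := (findAggregatedTag tag aggregation_mapping).getD ""
          if st.2.getD agg false then st
          else (st.1.insert agg (st.1.getD agg 0 + 1), st.2.insert agg true)) st) (freqs, ac0)
      st.1) (freqD f)
    = freqD (fun c => f c + (docs.countP (fun doc =>
        doc.2.any (fun lbs => lbs.any (fun l => catA itt l == c))) : Int)) := by
  induction docs generalizing f with
  | nil => simp only [List.foldl_nil, List.countP_nil]; congr 1; funext c; simp
  | cons doc docs ih =>
    have hac0 : (aggregation_mapping.foldl (fun d p => d.insert p.1 false) PySem.Dict.empty)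
        = flagD (fun _ => false) := by decide
    have hmem : ∀ l ∈ doc.2.flatten, catA itt l ∈ cats := by
      intro l hl
      obtain ⟨lbs, hlbs, hl⟩ := List.mem_flatten.mp hl
      exact h doc (List.mem_cons_self ..) lbs hlbs l hl
    have hhead : (doc.2.foldl (fun st lbs =>
        lbs.foldl (fun (st : PySem.Dict String Int × PySem.Dict String Bool) l =>
          let tag := (PySem.Dict.mk itt).getD l ""
          let agg := (findAggregatedTag tag aggregation_mapping).getD ""
          if st.2.getD agg false then st
          else (st.1.insert agg (st.1.getD agg 0 + 1), st.2.insert agg true)) st)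
        (freqD f, aggregation_mapping.foldl (fun d p => d.insert p.1 false) PySem.Dict.empty)).1
        = freqD (fun c => if doc.2.flatten.any (fun l => catA itt l == c) then f c + 1 else f c) := by
      rw [hac0, ← List.foldl_flatten, inner_loop itt _ f (fun _ => false) hmem]
      simp only [Bool.false_eq_true, if_false]
    rw [List.foldl_cons]
    show docs.foldl _ ((doc.2.foldl _ (freqD f, aggregation_mapping.foldl (fun d p => d.insert p.1 false) PySem.Dict.empty)).1) = _
    rw [hhead, ih _ (fun p hp => h p (List.mem_cons_of_mem _ hp))]
    congr 1; funext c
    rw [List.countP_cons, ← List.any_flatten]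
    by_cases hhit : doc.2.flatten.any (fun l => catA itt l == c)
    · simp only [hhit, if_pos]; push_cast; ring
    · simp only [hhit]; simp

-- ===== VERDICT (by name: the statement is the Claim_ definition above) =====
theorem unfair_document_per_categories_spec : Claim_equal_unfair_document_per_categories := by
  intro lpd itt _ hpre
  unfold Spec_unfair_document_per_categories
  simp only [unfair_document_per_categories, unfair_document_per_categories_alt]
  have hcats : ∀ p ∈ lpd, ∀ lbs ∈ p.2, ∀ l ∈ lbs, catA itt l ∈ cats := by
    intro p hp lbs hlbs l hl
    obtain ⟨t, hget, ht⟩ := hpre p hp lbs hlbs l hl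
    have hg : (PySem.Dict.mk itt).getD l "" = t := PySem.Dict.getD_of_get?_eq_some _ _ hget
    unfold catA
    rw [hg]
    exact find_mem_cats t ht
  have hinit : (aggregation_mapping.foldl (fun d p => d.insert p.1 0) PySem.Dict.empty)
      = freqD (fun _ => (0 : Int)) := by decide
  rw [hinit, outer_loop itt lpd _ hcats]
  have hitems : ∀ (q : String → Int), (freqD q).items = aggregation_mapping.map (fun p => (p.1, q p.1)) := by
    intro q; rw [freqD, cats, List.map_map]; rfl
  rw [hitems]
  refine List.map_congr_left (fun p hp => ?_)
  simp only [zero_add, catA, revMap_eq_find]
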